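-- pv_equiv track=rewrite | github.com/RxndyOG/BachelorsThesisStateAbstractionStefanWerner | Agents/ValueBasedAgent.py | get_candidate_score
-- ===== SOURCE A (Python) =====
-- def get_candidate_score(state_tuple, parent_state_tuple):
--     """
--     Weiche Ähnlichkeitsmetrik zur Sortierung innerhalb eines Buckets.
--     Je kleiner, desto ähnlicher.
--     """
--     a = [x for x in state_tuple if x != 0]
--     b = [x for x in parent_state_tuple if x != 0]
--
--     a_sorted = sorted(a)
--     b_sorted = sorted(b)
--
--     # Unterschied in Länge + Unterschied in Werten
--     length_penalty = abs(len(a_sorted) - len(b_sorted)) * 1000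
--
--     min_len = min(len(a_sorted), len(b_sorted))
--     value_penalty = sum(abs(a_sorted[i] - b_sorted[i]) for i in range(min_len))
--
--     # Restliche Werte bestrafen
--     if len(a_sorted) > min_len:
--         value_penalty += sum(abs(x) for x in a_sorted[min_len:])
--     if len(b_sorted) > min_len:
--         value_penalty += sum(abs(x) for x in b_sorted[min_len:])
--
--     return length_penalty + value_penalty
-- ===== SOURCE B (Python) =====
-- def get_candidate_score(state_tuple, parent_state_tuple):
--     """
--     Weiche Ähnlichkeitsmetrik zur Sortierung innerhalb eines Buckets.
--     Je kleiner, desto ähnlicher.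
--     """
--     a = [x for x in state_tuple if x != 0]
--     b = [x for x in parent_state_tuple if x != 0]
--
--     # selection-based: repeatedly extract the current minimum of each side and
--     # compare them, instead of sorting and walking positions.  Correct because
--     # pairing the k-th smallest values positionally (A, after sorting) is the
--     # same as pairing successive minima.
--     score = 0
--     while a and b:
--         x = min(a)
--         y = min(b)
--         a.remove(x)
--         b.remove(y)
--         score += abs(x - y)
--
--     rest = a if a else b
--     score += 1000 * len(rest)
--     for x in rest:
--         score += abs(x)
--     return score
-- ===== Notes on version B (the rewrite author's own statement) =====
-- stated objective: alternative
-- what changed: B never sorts: it repeatedly extracts the current minimum of each zero-filtered list (selection passes) accumulating |min_a - min_b|, then penalises the leftover list; A sorts both lists once and walks positions with an index loop plus two conditional tail sums.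
import Mathlib
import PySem

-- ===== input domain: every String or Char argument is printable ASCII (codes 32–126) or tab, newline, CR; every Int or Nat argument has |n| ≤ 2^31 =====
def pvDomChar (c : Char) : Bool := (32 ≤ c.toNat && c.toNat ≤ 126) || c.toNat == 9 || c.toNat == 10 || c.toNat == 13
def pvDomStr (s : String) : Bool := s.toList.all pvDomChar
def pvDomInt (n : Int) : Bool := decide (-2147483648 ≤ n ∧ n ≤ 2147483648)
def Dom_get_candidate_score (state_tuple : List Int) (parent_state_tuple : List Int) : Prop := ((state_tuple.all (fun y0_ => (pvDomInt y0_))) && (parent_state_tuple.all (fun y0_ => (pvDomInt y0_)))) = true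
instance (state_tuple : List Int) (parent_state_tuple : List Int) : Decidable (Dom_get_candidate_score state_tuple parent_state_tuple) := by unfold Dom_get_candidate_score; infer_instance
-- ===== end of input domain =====

-- B replaces A's sort-then-position-walk by a sort-free selection scheme: repeatedly
-- extract the current minimum of each zero-filtered list and compare; objective: alternative.

-- ===== PORT A =====
def get_candidate_score (state_tuple : List Int) (parent_state_tuple : List Int) : Int :=
  let a := state_tuple.filter (fun x => x != 0)
  let b := parent_state_tuple.filter (fun x => x != 0)
  let a_sorted := PySem.List.sorted a (fun x => x) false
  let b_sorted := PySem.List.sorted b (fun x => x) false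
  let length_penalty : Int := |(a_sorted.length : Int) - (b_sorted.length : Int)| * 1000
  let min_len := min a_sorted.length b_sorted.length
  let value_penalty : Int :=
    ((List.range min_len).map (fun i => |a_sorted.getD i 0 - b_sorted.getD i 0|)).sum
  let value_penalty :=
    if a_sorted.length > min_len then
      value_penalty + ((PySem.List.slice a_sorted (some (min_len : Int)) none).map (fun x => |x|)).sum
    else value_penalty
  let value_penalty :=
    if b_sorted.length > min_len then
      value_penalty + ((PySem.List.slice b_sorted (some (min_len : Int)) none).map (fun x => |x|)).sum
    else value_penalty
  length_penalty + value_penalty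

-- ===== PORT B =====
-- min(l): first minimal element; only evaluated on nonempty lists (while a and b),
-- so the getD defaults are never reached.
-- cited by loopB's decreasing_by: min(l) is in l, so l.remove(min(l)) is one shorter
theorem min?_isSome_of_ne_nil (l : List Int) (h : l ≠ []) :
    ∃ m, PySem.List.min? l (fun v => v) = some m := by
  cases hm : PySem.List.min? l (fun v => v) with
  | none => exact absurd ((PySem.List.min?_eq_none_iff _ _).mp hm) h
  | some m => exact ⟨m, rfl⟩

theorem minRemove_length (l : List Int) (h : l ≠ []) :
    ((PySem.List.remove? l ((PySem.List.min? l (fun v => v)).getD 0)).getD l).length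
      = l.length - 1 := by
  obtain ⟨m, hm⟩ := min?_isSome_of_ne_nil l h
  have hmem : m ∈ l := PySem.List.min?_mem hm
  rw [hm, Option.getD_some, PySem.List.remove?_eq_some_erase l m hmem, Option.getD_some]
  exact List.length_erase_of_mem hmem

-- while a and b: x = min(a); y = min(b); a.remove(x); b.remove(y); score += abs(x - y)
def loopB (a b : List Int) (score : Int) : Int × List Int × List Int :=
  if h : a ≠ [] ∧ b ≠ [] then
    loopB ((PySem.List.remove? a ((PySem.List.min? a (fun v => v)).getD 0)).getD a)
          ((PySem.List.remove? b ((PySem.List.min? b (fun v => v)).getD 0)).getD b)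
          (score + |(PySem.List.min? a (fun v => v)).getD 0
                      - (PySem.List.min? b (fun v => v)).getD 0|)
  else (score, a, b)
termination_by a.length
decreasing_by
  have := minRemove_length a h.1
  have : a.length ≠ 0 := by
    intro h0; exact h.1 (List.eq_nil_of_length_eq_zero h0)
  omega

def get_candidate_score_alt (state_tuple : List Int) (parent_state_tuple : List Int) : Int :=
  let a := state_tuple.filter (fun x => x != 0)
  let b := parent_state_tuple.filter (fun x => x != 0)
  let r := loopB a b 0
  let rest := if r.2.1 ≠ [] then r.2.1 else r.2.2
  let score := r.1 + 1000 * (rest.length : Int)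
  rest.foldl (fun sc x => sc + |x|) score

-- ===== PRECONDITION & SPEC =====
def Spec_get_candidate_score (state_tuple : List Int) (parent_state_tuple : List Int) (out : Int) : Prop := out = get_candidate_score_alt state_tuple parent_state_tuple
instance (state_tuple : List Int) (parent_state_tuple : List Int) (out : Int) : Decidable (Spec_get_candidate_score state_tuple parent_state_tuple out) := by unfold Spec_get_candidate_score; infer_instance

-- ===== CLAIM (what is proved, stated in full; the proofs are below) =====
def Claim_equal_get_candidate_score : Prop := ∀ (state_tuple : List Int) (parent_state_tuple : List Int), Dom_get_candidate_score state_tuple parent_state_tuple → Spec_get_candidate_score state_tuple parent_state_tuple (get_candidate_score state_tuple parent_state_tuple)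

-- ===== LEMMAS AND PROOFS =====

-- pairing the k-th smallest with the k-th smallest, with unmatched tails at |x|
def pairSum : List Int → List Int → Int
  | [], b => (b.map (fun x => |x|)).sum
  | a, [] => (a.map (fun x => |x|)).sum
  | x :: xs, y :: ys => |x - y| + pairSum xs ys

theorem pairSum_nil_left (b : List Int) : pairSum [] b = (b.map (fun x => |x|)).sum := rfl

theorem pairSum_nil_right (a : List Int) : pairSum a [] = (a.map (fun x => |x|)).sum := by
  cases a <;> simp [pairSum]

theorem pairSum_cons (x y : Int) (xs ys : List Int) :
    pairSum (x :: xs) (y :: ys) = |x - y| + pairSum xs ys := rfl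

-- extracting the minimum is taking the head of the sorted list
theorem sorted_minRemove (l : List Int) (h : l ≠ []) :
    PySem.List.sorted l (fun x => x) false
      = ((PySem.List.min? l (fun v => v)).getD 0)
          :: PySem.List.sorted
              ((PySem.List.remove? l ((PySem.List.min? l (fun v => v)).getD 0)).getD l)
              (fun x => x) false := by
  obtain ⟨m, hm⟩ := min?_isSome_of_ne_nil l h
  have hmem : m ∈ l := PySem.List.min?_mem hm
  rw [hm, Option.getD_some, PySem.List.remove?_eq_some_erase l m hmem, Option.getD_some]
  apply PySem.List.sorted_id_eq_of_perm_of_pairwise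
  · exact List.Perm.trans (List.Perm.cons _ (PySem.List.sorted_perm _ _ _))
      (List.perm_cons_erase hmem).symm
  · rw [List.pairwise_cons]
    constructor
    · intro z hz
      have hz' : z ∈ l.erase m := (PySem.List.mem_sorted _ _ _ _).mp hz
      exact PySem.List.min?_isMin hm z (List.mem_of_mem_erase hz')
    · exact PySem.List.sorted_pairwise _ _

-- foldl accumulation of absolute values
theorem absFold (l : List Int) (init : Int) :
    l.foldl (fun sc x => sc + |x|) init = init + (l.map (fun x => |x|)).sum := by
  induction l generalizing init with
  | nil => simp
  | cons x xs ih => simp [ih]; ring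

theorem sum_abs_sorted (l : List Int) :
    ((PySem.List.sorted l (fun x => x) false).map (fun x => |x|)).sum
      = (l.map (fun x => |x|)).sum :=
  ((PySem.List.sorted_perm l (fun x => x) false).map (fun x => |x|)).sum_eq

-- the trailing 'rest' processing, as B's port performs it
def Finish (r : Int × List Int × List Int) : Int :=
  let rest := if r.2.1 ≠ [] then r.2.1 else r.2.2
  rest.foldl (fun sc x => sc + |x|) (r.1 + 1000 * (rest.length : Int))

-- the heart of the B-side: the selection loop computes the length penalty plus
-- the positional distance of the two sorted lists
theorem loopB_spec (a b : List Int) (score : Int) :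
    Finish (loopB a b score)
      = score + 1000 * |(a.length : Int) - (b.length : Int)|
          + pairSum (PySem.List.sorted a (fun x => x) false)
              (PySem.List.sorted b (fun x => x) false) := by
  induction a, b, score using loopB.induct with
  | case1 a b score h ih =>
      rw [loopB, dif_pos h, ih]
      rw [sorted_minRemove a h.1, sorted_minRemove b h.2, pairSum_cons]
      have ha := minRemove_length a h.1
      have hb := minRemove_length b h.2
      have ha0 : a.length ≠ 0 := fun h0 => h.1 (List.eq_nil_of_length_eq_zero h0)
      have hb0 : b.length ≠ 0 := fun h0 => h.2 (List.eq_nil_of_length_eq_zero h0)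
      have habs :
          |(((PySem.List.remove? a ((PySem.List.min? a (fun v => v)).getD 0)).getD a).length : Int)
              - (((PySem.List.remove? b ((PySem.List.min? b (fun v => v)).getD 0)).getD b).length : Int)|
            = |(a.length : Int) - (b.length : Int)| := by
        rw [ha, hb]
        have : ((a.length - 1 : Nat) : Int) - ((b.length - 1 : Nat) : Int)
            = (a.length : Int) - (b.length : Int) := by omega
        rw [this]
      rw [habs]; ring
  | case2 a b score h =>
      rw [loopB, dif_neg h]
      have hs : PySem.List.sorted ([] : List Int) (fun x => x) false = [] :=
        PySem.List.sorted_eq_self_of_pairwise _ _ List.Pairwise.nil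
      by_cases hA : a = []
      · subst hA
        have hF : Finish (score, [], b)
            = b.foldl (fun sc x => sc + |x|) (score + 1000 * (b.length : Int)) := by
          unfold Finish; simp
        rw [hF, absFold, hs, pairSum_nil_left, sum_abs_sorted]
        have habs : |((0 : Int)) - (b.length : Int)| = (b.length : Int) := by
          rw [abs_sub_comm]; simp
        simp only [List.length_nil, Int.natCast_zero]
        rw [habs]
      · have hB : b = [] := by
          by_contra hB; exact h ⟨hA, hB⟩
        subst hB
        have hF : Finish (score, a, [])
            = a.foldl (fun sc x => sc + |x|) (score + 1000 * (a.length : Int)) := by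
          unfold Finish; simp [hA]
        rw [hF, absFold, hs, pairSum_nil_right, sum_abs_sorted]
        have habs : |(a.length : Int) - ((0 : Int))| = (a.length : Int) := by simp
        simp only [List.length_nil, Int.natCast_zero]
        rw [habs]

-- A-side: the three-part value penalty is pairSum
theorem pairSum_eq (a b : List Int) :
    ((List.range (min a.length b.length)).map (fun i => |a.getD i 0 - b.getD i 0|)).sum
      + ((a.drop (min a.length b.length)).map (fun x => |x|)).sum
      + ((b.drop (min a.length b.length)).map (fun x => |x|)).sum
    = pairSum a b := by
  induction a generalizing b with
  | nil => simp [pairSum_nil_left]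
  | cons x xs ih =>
      cases b with
      | nil => simp [pairSum_nil_right]
      | cons y ys =>
          have hmin : min (x :: xs).length (y :: ys).length = min xs.length ys.length + 1 := by
            simp [Nat.succ_min_succ]
          rw [hmin, List.range_succ_eq_map]
          simp only [List.map_cons, List.sum_cons, List.map_map, List.drop_succ_cons,
            List.getD_cons_zero]
          have hc : ((List.range (min xs.length ys.length)).map
              ((fun i => |(x :: xs).getD i 0 - (y :: ys).getD i 0|) ∘ Nat.succ)).sum
              = ((List.range (min xs.length ys.length)).map
                  (fun i => |xs.getD i 0 - ys.getD i 0|)).sum := by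
            congr 1
          rw [hc, pairSum_cons, ← ih ys]
          ring

-- the two conditional tail additions equal the unconditional ones
theorem cond_tail (n m : ℕ) (l : List Int) (v : Int) (h : m = min n l.length) :
    (if l.length > m then v + ((PySem.List.slice l (some (m : Int)) none).map (fun x => |x|)).sum else v)
      = v + ((l.drop m).map (fun x => |x|)).sum := by
  rw [PySem.List.slice_from_natCast]
  by_cases hgt : l.length > m
  · simp [hgt]
  · have : l.drop m = [] := List.drop_of_length_le (by omega)
    simp [hgt, this]

-- ===== VERDICT (by name: the statement is the Claim_ definition above) =====
theorem get_candidate_score_spec : Claim_equal_get_candidate_score := by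
  intro s p _
  unfold Spec_get_candidate_score get_candidate_score
  simp only []
  set fa := s.filter (fun x => x != 0) with hfa
  set fb := p.filter (fun x => x != 0) with hfb
  set a := PySem.List.sorted fa (fun x => x) false with ha
  set b := PySem.List.sorted fb (fun x => x) false with hb
  have hBA : get_candidate_score_alt s p = Finish (loopB fa fb 0) := rfl
  rw [hBA, loopB_spec, ← ha, ← hb]
  rw [cond_tail b.length (min a.length b.length) a _ (by omega),
      cond_tail a.length (min a.length b.length) b _ (by omega)]
  rw [pairSum_eq a b]
  have hla : a.length = fa.length := PySem.List.length_sorted _ _ _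
  have hlb : b.length = fb.length := PySem.List.length_sorted _ _ _
  rw [hla, hlb]
  ring
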